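-- pv_equiv track=rewrite | github.com/pypi-data/pypi-mirror-401 | packages/scratch3-analyzer/scratch3_analyzer-1.1.1-py3-none-any.whl/scratch3_analyzer/analyzer.py | _get_block_category
-- ===== SOURCE A (Python) =====
-- def _get_block_category(opcode: str) -> str:
--     """获取代码块类别"""
--     categories = {
--         'motion': ['motion_'],
--         'looks': ['looks_'],
--         'sound': ['sound_'],
--         'event': ['event_'],
--         'control': ['control_'],
--         'sensing': ['sensing_'],
--         'operator': ['operator_'],
--         'variables': ['data_'],
--         'myblocks': ['procedures_']
--     }
--
--     for category, prefixes in categories.items():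
--         for prefix in prefixes:
--             if opcode.startswith(prefix):
--                 return category
--
--     return 'other'
-- ===== SOURCE B (Python) =====
-- _CATEGORY_BY_PREFIX = {
--     'motion_': 'motion',
--     'looks_': 'looks',
--     'sound_': 'sound',
--     'event_': 'event',
--     'control_': 'control',
--     'sensing_': 'sensing',
--     'operator_': 'operator',
--     'data_': 'variables',
--     'procedures_': 'myblocks',
-- }
--
--
-- def _get_block_category(opcode: str) -> str:
--     """获取代码块类别"""
--     head, sep, _tail = opcode.partition('_')
--     return _CATEGORY_BY_PREFIX.get(head + sep, 'other')
-- ===== Notes on version B (the rewrite author's own statement) =====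
-- stated objective: idiomatic
-- what changed: Replaces the nested scan over the category-to-prefix-list dict with one str.partition on the underscore and a single direct lookup in a prefix-to-category table.
import Mathlib
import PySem

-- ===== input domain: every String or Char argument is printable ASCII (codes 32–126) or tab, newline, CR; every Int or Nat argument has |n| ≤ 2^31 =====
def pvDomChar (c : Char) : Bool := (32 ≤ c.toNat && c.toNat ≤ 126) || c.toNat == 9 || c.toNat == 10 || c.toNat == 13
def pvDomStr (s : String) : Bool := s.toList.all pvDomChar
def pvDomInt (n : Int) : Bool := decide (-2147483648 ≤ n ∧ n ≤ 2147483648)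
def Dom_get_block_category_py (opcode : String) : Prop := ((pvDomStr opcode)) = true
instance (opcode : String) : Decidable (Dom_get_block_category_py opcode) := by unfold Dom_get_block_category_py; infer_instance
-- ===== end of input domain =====

-- B replaces A's nested prefix scan by one str.partition plus a direct table lookup (idiomatic; same result).

-- ===== PORT A =====
-- the categories dict (values are the prefix lists), in insertion order
def pvCategories : List (String × List String) :=
  [("motion", ["motion_"]), ("looks", ["looks_"]), ("sound", ["sound_"]),
   ("event", ["event_"]), ("control", ["control_"]), ("sensing", ["sensing_"]),
   ("operator", ["operator_"]), ("variables", ["data_"]), ("myblocks", ["procedures_"])]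

-- inner 'for prefix in prefixes: if opcode.startswith(prefix): return category'
def pvInnerLoop (opcode : String) (prefixes : List String) : Bool :=
  match prefixes with
  | [] => false
  | p :: rest => if PySem.Str.startswith opcode p then true else pvInnerLoop opcode rest

-- outer 'for category, prefixes in categories.items()'
def pvOuterLoop (opcode : String) (cats : List (String × List String)) : String :=
  match cats with
  | [] => "other"
  | (cat, prefixes) :: rest =>
      if pvInnerLoop opcode prefixes then cat else pvOuterLoop opcode rest

def get_block_category_py (opcode : String) : String :=
  pvOuterLoop opcode pvCategories

-- ===== PORT B =====
-- opcode.partition('_') on code points: (head, sep, tail); exact for the 1-char separator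
def pvPartitionU (cs : List Char) : List Char × List Char × List Char :=
  match cs with
  | [] => ([], [], [])
  | c :: rest =>
      if c = '_' then ([], ['_'], rest)
      else
        let r := pvPartitionU rest
        (c :: r.1, r.2.1, r.2.2)

-- the module-level _CATEGORY_BY_PREFIX dict
def pvPrefixTable : PySem.Dict String String :=
  PySem.Dict.ofList
    [("motion_", "motion"), ("looks_", "looks"), ("sound_", "sound"),
     ("event_", "event"), ("control_", "control"), ("sensing_", "sensing"),
     ("operator_", "operator"), ("data_", "variables"), ("procedures_", "myblocks")]

def get_block_category_py_alt (opcode : String) : String :=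
  let r := pvPartitionU opcode.toList
  PySem.Dict.getD pvPrefixTable (String.ofList (r.1 ++ r.2.1)) "other"

-- ===== PRECONDITION & SPEC =====
def Spec_get_block_category_py (opcode : String) (out : String) : Prop := out = get_block_category_py_alt opcode
instance (opcode : String) (out : String) : Decidable (Spec_get_block_category_py opcode out) := by unfold Spec_get_block_category_py; infer_instance

-- ===== CLAIM (what is proved, stated in full; the proofs are below) =====
def Claim_equal_get_block_category_py : Prop := ∀ (opcode : String), Dom_get_block_category_py opcode → Spec_get_block_category_py opcode (get_block_category_py opcode)

-- ===== LEMMAS AND PROOFS =====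

-- the lookup key B computes: head ++ sep of the partition
def pvKey (cs : List Char) : List Char :=
  (pvPartitionU cs).1 ++ (pvPartitionU cs).2.1

-- For an underscore-free p, 'p ++ "_" is a prefix of cs' is exactly 'B's key equals p ++ "_"'.
theorem pvKey_iff (p : List Char) (h : '_' ∉ p) (cs : List Char) :
    (p ++ ['_']) <+: cs ↔ pvKey cs = p ++ ['_'] := by
  induction p generalizing cs with
  | nil =>
      cases cs with
      | nil => simp [pvKey, pvPartitionU]
      | cons c rest =>
          by_cases hc : c = '_'
          · subst hc; simp [pvKey, pvPartitionU]
          · simp [pvKey, pvPartitionU, hc, List.cons_prefix_cons, Ne.symm hc]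
  | cons a p ih =>
      have ha : a ≠ '_' := fun e => h (e ▸ List.mem_cons_self)
      have hp : '_' ∉ p := fun e => h (List.mem_cons_of_mem _ e)
      cases cs with
      | nil => simp [pvKey, pvPartitionU]
      | cons c rest =>
          by_cases hc : c = '_'
          · subst hc
            simp [pvKey, pvPartitionU, List.cons_prefix_cons, Ne.symm ha]
            exact fun e => absurd e ha
          · simp [pvKey, pvPartitionU, hc, List.cons_prefix_cons, ih hp rest]
            exact fun _ => eq_comm

-- turn each startswith test of A into the statement 'B's key equals this literal'
theorem pvStarts (opcode : String) (p : List Char) (hp : '_' ∉ p) :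
    (PySem.Str.startswith opcode (String.ofList (p ++ ['_'])) = true)
      ↔ pvKey opcode.toList = p ++ ['_'] := by
  rw [PySem.Str.startswith_eq, PySem.Chars.startswith_iff, String.toList_ofList]
  exact pvKey_iff p hp opcode.toList

-- ===== VERDICT (by name: the statement is the Claim_ definition above) =====
theorem get_block_category_py_spec : Claim_equal_get_block_category_py := by
  intro opcode _
  show get_block_category_py opcode = get_block_category_py_alt opcode
  have h1 : PySem.Str.startswith opcode "motion_" = true ↔ pvKey opcode.toList = "motion_".toList :=
    pvStarts opcode "motion".toList (by decide)
  have h2 : PySem.Str.startswith opcode "looks_" = true ↔ pvKey opcode.toList = "looks_".toList :=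
    pvStarts opcode "looks".toList (by decide)
  have h3 : PySem.Str.startswith opcode "sound_" = true ↔ pvKey opcode.toList = "sound_".toList :=
    pvStarts opcode "sound".toList (by decide)
  have h4 : PySem.Str.startswith opcode "event_" = true ↔ pvKey opcode.toList = "event_".toList :=
    pvStarts opcode "event".toList (by decide)
  have h5 : PySem.Str.startswith opcode "control_" = true ↔ pvKey opcode.toList = "control_".toList :=
    pvStarts opcode "control".toList (by decide)
  have h6 : PySem.Str.startswith opcode "sensing_" = true ↔ pvKey opcode.toList = "sensing_".toList :=
    pvStarts opcode "sensing".toList (by decide)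
  have h7 : PySem.Str.startswith opcode "operator_" = true ↔ pvKey opcode.toList = "operator_".toList :=
    pvStarts opcode "operator".toList (by decide)
  have h8 : PySem.Str.startswith opcode "data_" = true ↔ pvKey opcode.toList = "data_".toList :=
    pvStarts opcode "data".toList (by decide)
  have h9 : PySem.Str.startswith opcode "procedures_" = true ↔ pvKey opcode.toList = "procedures_".toList :=
    pvStarts opcode "procedures".toList (by decide)
  simp only [get_block_category_py, pvCategories, pvOuterLoop, pvInnerLoop,
    get_block_category_py_alt, h1, h2, h3, h4, h5, h6, h7, h8, h9]
  rw [show (pvPartitionU opcode.toList).1 ++ (pvPartitionU opcode.toList).2.1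
        = pvKey opcode.toList from rfl]
  by_cases g1 : pvKey opcode.toList = "motion_".toList
  · rw [if_pos g1, g1]; decide
  rw [if_neg g1]
  by_cases g2 : pvKey opcode.toList = "looks_".toList
  · rw [if_pos g2, g2]; decide
  rw [if_neg g2]
  by_cases g3 : pvKey opcode.toList = "sound_".toList
  · rw [if_pos g3, g3]; decide
  rw [if_neg g3]
  by_cases g4 : pvKey opcode.toList = "event_".toList
  · rw [if_pos g4, g4]; decide
  rw [if_neg g4]
  by_cases g5 : pvKey opcode.toList = "control_".toList
  · rw [if_pos g5, g5]; decide
  rw [if_neg g5]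
  by_cases g6 : pvKey opcode.toList = "sensing_".toList
  · rw [if_pos g6, g6]; decide
  rw [if_neg g6]
  by_cases g7 : pvKey opcode.toList = "operator_".toList
  · rw [if_pos g7, g7]; decide
  rw [if_neg g7]
  by_cases g8 : pvKey opcode.toList = "data_".toList
  · rw [if_pos g8, g8]; decide
  rw [if_neg g8]
  by_cases g9 : pvKey opcode.toList = "procedures_".toList
  · rw [if_pos g9, g9]; decide
  rw [if_neg g9]
  have n : ∀ (k : String), pvKey opcode.toList ≠ k.toList →
      (k == String.ofList (pvKey opcode.toList)) = false := by
    intro k hk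
    simp only [beq_eq_false_iff_ne, ne_eq]
    intro e
    exact hk (by simpa using congrArg String.toList e.symm)
  simp [pvPrefixTable, PySem.Dict.getD, PySem.Dict.ofList, PySem.Dict.get?,
    PySem.Dict.update, PySem.Dict.empty, PySem.Dict.insert,
    PySem.Dict.contains, List.find?,
    n _ g1, n _ g2, n _ g3, n _ g4, n _ g5, n _ g6, n _ g7, n _ g8, n _ g9]
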